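-- pv_equiv track=rewrite | github.com/BouchardLab/cv_paper_plots | cv_paper_plots/pipeline_analysis.py | make_colors
-- ===== SOURCE A (Python) =====
-- def make_colors(n):
--     colors = []
--     for ii in range(n):
--         if ii % 2 == 0:
--             colors.append('k')
--         else:
--             colors.append('gray')
--     return colors
-- ===== SOURCE B (Python) =====
-- def make_colors(n):
--     return (['k', 'gray'] * ((n + 1) // 2))[:n]
-- ===== Notes on version B (the rewrite author's own statement) =====
-- stated objective: simpler
-- what changed: Replaces the index loop with a per-element parity branch by replicating the two-element block ['k','gray'] enough times and slicing to length n.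
import Mathlib
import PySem

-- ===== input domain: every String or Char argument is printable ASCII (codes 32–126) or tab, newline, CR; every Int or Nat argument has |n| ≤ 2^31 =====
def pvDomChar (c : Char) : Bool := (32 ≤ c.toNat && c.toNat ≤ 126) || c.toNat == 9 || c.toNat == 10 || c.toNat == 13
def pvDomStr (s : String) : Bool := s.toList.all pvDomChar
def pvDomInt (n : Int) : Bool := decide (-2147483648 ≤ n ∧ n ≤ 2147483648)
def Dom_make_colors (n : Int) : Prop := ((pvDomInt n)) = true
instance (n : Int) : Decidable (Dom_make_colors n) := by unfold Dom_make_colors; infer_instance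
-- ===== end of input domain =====

-- B builds the answer by repeating the two-element block ['k','gray'] and slicing to n (simpler: no per-element parity branch).

-- ===== PORT A =====
def make_colors (n : Int) : List String :=
  (PySem.List.pyRange 0 n 1).foldl
    (fun colors ii => if PySem.Int.mod ii 2 = 0 then colors ++ ["k"] else colors ++ ["gray"]) []

-- ===== PORT B =====
-- ['k','gray'] * m  (empty for m ≤ 0, hence .toNat) then the slice [:n]
def make_colors_alt (n : Int) : List String :=
  PySem.List.slice (List.flatten (List.replicate (PySem.Int.floordiv (n + 1) 2).toNat ["k", "gray"])) none (some n)

-- ===== PRECONDITION & SPEC =====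
def Spec_make_colors (n : Int) (out : List String) : Prop := out = make_colors_alt n
instance (n : Int) (out : List String) : Decidable (Spec_make_colors n out) := by unfold Spec_make_colors; infer_instance

-- ===== CLAIM (what is proved, stated in full; the proofs are below) =====
def Claim_equal_make_colors : Prop := ∀ (n : Int), Dom_make_colors n → Spec_make_colors n (make_colors n)

-- ===== LEMMAS AND PROOFS =====

-- closed recursive description both sides are reduced to
def gAlt : Nat → List String
  | 0 => []
  | 1 => ["k"]
  | (k+2) => "k" :: "gray" :: gAlt k

theorem gAlt_succ (k : Nat) :
    gAlt (k + 1) = gAlt k ++ [if k % 2 = 0 then "k" else "gray"] := by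
  induction k using Nat.twoStepInduction with
  | zero => simp [gAlt]
  | one => simp [gAlt]
  | more k ih _ =>
    show gAlt (k + 3) = gAlt (k + 2) ++ _
    have : k + 3 = (k + 1) + 2 := by omega
    rw [this, gAlt, gAlt, ih]
    simp [Nat.add_mod_right]

theorem portA_nat (k : Nat) : make_colors (k : Int) = gAlt k := by
  induction k with
  | zero => simp [make_colors, PySem.List.pyRange_one_eq_nil, gAlt]
  | succ k ih =>
    have h : PySem.List.pyRange 0 ((k : Int) + 1) 1
        = PySem.List.pyRange 0 (k : Int) 1 ++ [(k : Int)] := by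
      exact PySem.List.pyRange_one_succ_right (by positivity)
    unfold make_colors at ih ⊢
    push_cast
    rw [h, List.foldl_append, ih, gAlt_succ]
    by_cases hk : k % 2 = 0
    · simp [hk]
      omega
    · have h1 : k % 2 = 1 := Nat.mod_two_ne_zero.mp hk
      simp [h1]
      omega

theorem portB_nat (k : Nat) :
    (List.flatten (List.replicate ((k + 1) / 2) ["k", "gray"])).take k = gAlt k := by
  induction k using Nat.twoStepInduction with
  | zero => simp [gAlt]
  | one => simp [gAlt]
  | more k ih _ =>
    have h2 : (k + 2 + 1) / 2 = (k + 1) / 2 + 1 := by omega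
    rw [h2, List.replicate_succ, List.flatten_cons]
    show ("k" :: "gray" :: _).take (k + 2) = gAlt (k + 2)
    simp [gAlt, ih]

theorem eq_all (n : Int) : make_colors n = make_colors_alt n := by
  rcases le_or_gt n 0 with hn | hn
  · -- n ≤ 0 : both sides empty
    have hA : make_colors n = [] := by
      simp [make_colors, PySem.List.pyRange_one_eq_nil hn]
    have hm : (PySem.Int.floordiv (n + 1) 2).toNat = 0 := by
      rcases eq_or_lt_of_le hn with rfl | hneg
      · decide
      · have : PySem.Int.floordiv (n + 1) 2 = (n + 1) / 2 :=
          PySem.Int.floordiv_eq_ediv_of_pos (by omega)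
        rw [this]
        omega
    rw [hA]
    unfold make_colors_alt
    rw [hm]
    simp [PySem.List.slice]
  · -- n > 0 : reduce to the Nat lemmas
    obtain ⟨k, rfl⟩ : ∃ k : Nat, n = (k : Int) := ⟨n.toNat, by omega⟩
    unfold make_colors_alt
    have hf : (PySem.Int.floordiv ((k : Int) + 1) 2).toNat = (k + 1) / 2 := by
      have : PySem.Int.floordiv ((k : Int) + 1) 2 = (((k + 1 : Nat) / 2 : Nat) : Int) := by
        exact_mod_cast PySem.Int.floordiv_natCast (k + 1) 2
      rw [this]; omega
    rw [hf, PySem.List.slice_to_natCast, portA_nat, portB_nat]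

-- ===== VERDICT (by name: the statement is the Claim_ definition above) =====
theorem make_colors_spec : Claim_equal_make_colors := by
  intro n _
  unfold Spec_make_colors
  exact eq_all n
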